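-- pv_equiv track=rewrite | github.com/Dixon-SS03/Proyecto_MA0322 | MA0322/models/planos_model.py | dividir_ecuacuion
-- ===== SOURCE A (Python) =====
-- def dividir_ecuacuion(texto: str) -> str:
--     izquierda = ""
--     derecha = ""
--     igualdad = False
--     for caracteres in texto:
--         if caracteres == "=":
--             igualdad = True
--             continue
--         if not igualdad:
--             izquierda += caracteres
--         else:
--             derecha += caracteres
--     if not igualdad:
--         raise ValueError("La ecuacion no contiene ningun caracter de igualdad")
--     return izquierda, derecha
-- ===== SOURCE B (Python) =====
-- def dividir_ecuacuion(texto: str) -> str: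
--     partes = texto.split("=")
--     if len(partes) == 1:
--         raise ValueError("La ecuacion no contiene ningun caracter de igualdad")
--     return partes[0], "".join(partes[1:])
-- ===== Notes on version B (the rewrite author's own statement) =====
-- stated objective: simpler
-- what changed: Replaces the stateful character-by-character accumulation (flag + two growing strings) with a single split('=') followed by joining the tail segments.
import Mathlib
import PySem

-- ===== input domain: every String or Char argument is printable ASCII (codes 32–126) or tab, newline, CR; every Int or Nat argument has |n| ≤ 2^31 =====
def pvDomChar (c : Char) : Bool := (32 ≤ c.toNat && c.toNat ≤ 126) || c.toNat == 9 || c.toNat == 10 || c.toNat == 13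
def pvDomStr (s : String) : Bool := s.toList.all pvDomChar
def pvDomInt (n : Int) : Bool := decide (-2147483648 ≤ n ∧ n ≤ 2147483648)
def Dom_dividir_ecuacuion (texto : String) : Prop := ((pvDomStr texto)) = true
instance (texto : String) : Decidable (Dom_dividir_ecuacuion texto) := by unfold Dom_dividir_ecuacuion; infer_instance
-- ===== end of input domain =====

-- B replaces A's stateful char-by-char accumulation by split-on-'=' then join of the tail; objective: simpler.

-- ===== PORT A =====
-- the for-loop over the characters, state (izquierda, derecha, igualdad)
def dividirLoopA : List Char → List Char → List Char → Bool → (List Char × List Char × Bool)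
  | [], izq, der, ig => (izq, der, ig)
  | c :: rest, izq, der, ig =>
    if c = '=' then dividirLoopA rest izq der true
    else if ig = false then dividirLoopA rest (izq ++ [c]) der ig
    else dividirLoopA rest izq (der ++ [c]) ig

-- Python raises ValueError when the flag component is false; those inputs are excluded by Pre_
def dividir_ecuacuion (texto : String) : String × String :=
  (String.ofList (dividirLoopA texto.toList [] [] false).1,
   String.ofList (dividirLoopA texto.toList [] [] false).2.1)

-- ===== PORT B =====
def dividir_ecuacuion_alt (texto : String) : String × String :=
  if ((PySem.Chars.splitOn texto.toList "=".toList).map String.ofList).length == 1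
  then ("", "")  -- Python raises ValueError here; excluded by Pre_
  else (((PySem.Chars.splitOn texto.toList "=".toList).map String.ofList).headD "",
        PySem.Str.join "" ((PySem.Chars.splitOn texto.toList "=".toList).map String.ofList).tail)

-- ===== PRECONDITION & SPEC =====
-- Pre_ excludes exactly the inputs with no '=' at all, where the Python A raises ValueError.
def Pre_dividir_ecuacuion (texto : String) : Prop := '=' ∈ texto.toList
instance (texto : String) : Decidable (Pre_dividir_ecuacuion texto) := by unfold Pre_dividir_ecuacuion; infer_instance
def pvWitness_dividir_ecuacuion : String := "x=y"

def Spec_dividir_ecuacuion (texto : String) (out : String × String) : Prop := out = dividir_ecuacuion_alt texto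
instance (texto : String) (out : String × String) : Decidable (Spec_dividir_ecuacuion texto out) := by unfold Spec_dividir_ecuacuion; infer_instance

-- ===== CLAIM (what is proved, stated in full; the proofs are below) =====
def Claim_equal_dividir_ecuacuion : Prop := ∀ (texto : String), Dom_dividir_ecuacuion texto → Pre_dividir_ecuacuion texto → Spec_dividir_ecuacuion texto (dividir_ecuacuion texto)

-- ===== LEMMAS AND PROOFS =====

-- fuel-free version of PySem.Chars.splitOn with separator ['=']
def pieces : List Char → List (List Char)
  | [] => [[]]
  | c :: rest => if c = '=' then [] :: pieces rest else (pieces rest).modifyHead (c :: ·)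

theorem pieces_ne_nil (cs : List Char) : pieces cs ≠ [] := by
  cases cs with
  | nil => simp [pieces]
  | cons c rest =>
    simp only [pieces]
    split
    · simp
    · cases h : pieces rest with
      | nil => exact absurd h (pieces_ne_nil rest)
      | cons a l => simp [List.modifyHead]

theorem splitOn_go_eq (fuel : Nat) (cs cur : List Char) (acc : List (List Char))
    (h : cs.length ≤ fuel) :
    PySem.Chars.splitOn.go ['='] fuel cs cur acc
      = acc.reverse ++ (pieces cs).modifyHead (cur.reverse ++ ·) := by
  induction cs generalizing fuel cur acc with
  | nil =>
    cases fuel with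
    | zero => simp [PySem.Chars.splitOn.go, pieces, List.modifyHead]
    | succ n => simp [PySem.Chars.splitOn.go, pieces, List.modifyHead]
  | cons c rest ih =>
    cases fuel with
    | zero => simp at h
    | succ n =>
      simp only [PySem.Chars.splitOn.go]
      by_cases hc : c = '='
      · subst hc
        have hp : List.isPrefixOf ['='] ('=' :: rest) = true := by
          simp [List.isPrefixOf]
        rw [if_pos hp]
        have hrw := ih n [] (List.reverse cur :: acc) (by simpa using Nat.le_of_succ_le_succ h)
        simp only [List.length_singleton, List.drop_succ_cons, List.drop_zero]
        rw [hrw]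
        simp only [pieces, List.modifyHead, List.reverse_nil, List.nil_append,
          List.reverse_cons, List.append_assoc, List.singleton_append]
        cases pieces rest <;> simp
      · have hp : List.isPrefixOf ['='] (c :: rest) = false := by
          simp [List.isPrefixOf, Ne.symm hc]
        rw [if_neg (by simp [hp])]
        have := ih n (c :: cur) acc (by simpa using Nat.le_of_succ_le_succ h)
        rw [this]
        have hrest := pieces_ne_nil rest
        cases hpr : pieces rest with
        | nil => exact absurd hpr hrest
        | cons a l => simp [pieces, hc, hpr, List.modifyHead]

theorem splitOn_eq_pieces (cs : List Char) :
    PySem.Chars.splitOn cs ['='] = pieces cs := by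
  unfold PySem.Chars.splitOn
  rw [splitOn_go_eq (cs.length + 1) cs [] [] (by omega)]
  cases h : pieces cs with
  | nil => exact absurd h (pieces_ne_nil cs)
  | cons a l => simp [List.modifyHead]

theorem join_nil_flatten (l : List (List Char)) : PySem.Chars.join [] l = l.flatten := by
  induction l with
  | nil => simp [PySem.Chars.join, List.intercalate]
  | cons a t ih =>
    cases t with
    | nil => simp [PySem.Chars.join, List.intercalate]
    | cons b u =>
      simp only [PySem.Chars.join, List.intercalate] at ih ⊢
      simp [List.intersperse] at ih ⊢
      exact ih

theorem pieces_decomp (cs : List Char) (h : '=' ∈ cs) :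
    pieces cs = cs.takeWhile (· ≠ '=') :: pieces ((cs.dropWhile (· ≠ '=')).tail) := by
  induction cs with
  | nil => simp at h
  | cons c rest ih =>
    by_cases hc : c = '='
    · subst hc
      simp [pieces, List.takeWhile, List.dropWhile]
    · have hr : '=' ∈ rest := by
        cases h with
        | head => exact absurd rfl hc
        | tail _ h => exact h
      simp only [pieces, if_neg hc, ih hr, List.modifyHead]
      simp [List.takeWhile, List.dropWhile, hc]

theorem flatten_pieces (cs : List Char) :
    (pieces cs).flatten = cs.filter (· ≠ '=') := by
  induction cs with
  | nil => simp [pieces]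
  | cons c rest ih =>
    by_cases hc : c = '='
    · subst hc; simp [pieces, ih]
    · have hr := pieces_ne_nil rest
      cases hpr : pieces rest with
      | nil => exact absurd hpr hr
      | cons a l =>
        simp only [pieces, if_neg hc, hpr, List.modifyHead]
        rw [hpr] at ih
        simp only [List.flatten_cons] at ih ⊢
        rw [List.filter_cons_of_pos (by simp [hc])]
        simpa using ih

theorem loopA_true (cs izq der : List Char) :
    dividirLoopA cs izq der true = (izq, der ++ cs.filter (· ≠ '='), true) := by
  induction cs generalizing der with
  | nil => simp [dividirLoopA]
  | cons c rest ih =>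
    by_cases hc : c = '='
    · subst hc; simp [dividirLoopA, ih]
    · simp [dividirLoopA, hc, ih, List.filter]

theorem loopA_false (cs izq der : List Char) (h : '=' ∈ cs) :
    dividirLoopA cs izq der false
      = (izq ++ cs.takeWhile (· ≠ '='),
         der ++ ((cs.dropWhile (· ≠ '=')).tail).filter (· ≠ '='), true) := by
  induction cs generalizing izq with
  | nil => simp at h
  | cons c rest ih =>
    by_cases hc : c = '='
    · subst hc
      simp [dividirLoopA, loopA_true, List.takeWhile, List.dropWhile]
    · have hr : '=' ∈ rest := by
        cases h with
        | head => exact absurd rfl hc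
        | tail _ h => exact h
      simp only [dividirLoopA, if_neg hc]
      rw [ih _ hr]
      simp [List.takeWhile, List.dropWhile, hc]

theorem pieces_length_ge_two (cs : List Char) (h : '=' ∈ cs) :
    2 ≤ (pieces cs).length := by
  rw [pieces_decomp cs h]
  have := pieces_ne_nil ((cs.dropWhile (· ≠ '=')).tail)
  cases hp : pieces ((cs.dropWhile (· ≠ '=')).tail) with
  | nil => exact absurd hp this
  | cons a l => simp

-- ===== VERDICT (by name: the statement is the Claim_ definition above) =====
theorem dividir_ecuacuion_spec : Claim_equal_dividir_ecuacuion := by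
  intro texto _ hpre
  have hmem : '=' ∈ texto.toList := hpre
  have hlen2 := pieces_length_ge_two texto.toList hmem
  unfold Spec_dividir_ecuacuion dividir_ecuacuion dividir_ecuacuion_alt
  have hsep : "=".toList = ['='] := rfl
  rw [hsep, splitOn_eq_pieces, loopA_false _ _ _ hmem]
  rw [if_neg (by simp only [List.length_map, beq_iff_eq]; omega)]
  rw [pieces_decomp texto.toList hmem]
  simp only [Prod.mk.injEq, List.map_cons, List.tail_cons, List.headD, List.nil_append]
  refine ⟨trivial, ?_⟩
  simp only [PySem.Str.join, List.map_map]
  have hmaps : ∀ (l : List (List Char)), List.map (String.toList ∘ String.ofList) l = l := by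
    intro l; simp [Function.comp_def]
  rw [hmaps]
  have hnil : ("" : String).toList = ([] : List Char) := rfl
  rw [hnil, join_nil_flatten, flatten_pieces]
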